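-- pv_equiv track=rewrite | github.com/cepxuozab/YandexTrainingAlgorithms | Training9/Блок 2 Множества и словари/Соревнование 4/B. Парные k-префиксы/task.py | searches
-- ===== SOURCE A (Python) =====
-- from collections import Counter
--
-- def check(words: list[str], length: int) -> bool:
--     prefixes = (word[:length] for word in words)
--     cnt = Counter(prefixes)
--     return all(v % 2 == 0 for v in cnt.values())
--
-- def searches(words: list[str]) -> int:
--     left, right = 0, len(words[0])
--     while left < right:
--         mid = (left + right + 1) // 2
--         if check(words, mid):
--             left = mid
--         else:
--             right = mid - 1
--     return left
-- ===== SOURCE B (Python) =====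
-- def searches(words: list[str]) -> int:
--     total = len(words[0])
--     k = 0
--     while k < total:
--         odd = set()
--         for w in words:
--             p = w[:k + 1]
--             if p in odd:
--                 odd.remove(p)
--             else:
--                 odd.add(p)
--         if odd:
--             break
--         k += 1
--     return k
-- ===== Notes on version B (the rewrite author's own statement) =====
-- stated objective: alternative
-- what changed: B replaces A's binary search over the prefix length (building a fresh Counter of all k-prefixes at every probe) by a single ascending scan that maintains a parity (symmetric-difference) set of the current-level prefixes and stops at the first level whose prefixes do not all pair up.
-- outside the precondition, e.g. on searches([]): A raises IndexError, B raises IndexError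
import Mathlib
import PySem

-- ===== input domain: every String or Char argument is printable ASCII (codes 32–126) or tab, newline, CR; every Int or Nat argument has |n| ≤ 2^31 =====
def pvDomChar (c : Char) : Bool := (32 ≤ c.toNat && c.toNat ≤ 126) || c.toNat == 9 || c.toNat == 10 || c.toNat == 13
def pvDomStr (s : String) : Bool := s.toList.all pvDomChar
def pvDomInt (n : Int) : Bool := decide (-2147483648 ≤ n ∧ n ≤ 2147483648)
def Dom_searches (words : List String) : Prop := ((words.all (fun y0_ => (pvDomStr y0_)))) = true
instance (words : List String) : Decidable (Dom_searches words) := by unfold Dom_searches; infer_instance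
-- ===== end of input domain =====

-- B replaces A's binary search over prefix lengths (a fresh Counter per probe) by an ascending
-- scan that stops at the first level whose prefixes do not pair up, tracked with a parity
-- (symmetric-difference) set instead of a Counter; objective: alternative (not faster).

-- ===== PORT A =====
def checkA (words : List String) (length : Int) : Bool :=
  let prefixes := words.map (fun word => PySem.Str.slice word none (some length))
  let cnt := PySem.Dict.counter prefixes
  cnt.values.all (fun v => PySem.Int.mod v 2 == 0)

theorem pvMidLt {left right : Int} (h : left < right) :
    left < PySem.Int.floordiv (left + right + 1) 2 ∧
      PySem.Int.floordiv (left + right + 1) 2 ≤ right := by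
  have : PySem.Int.floordiv (left + right + 1) 2 = (left + right + 1) / 2 := by
    simp [PySem.Int.floordiv, Int.fdiv_eq_ediv]
  rw [this]; omega

def searchesLoop (words : List String) (left right : Int) : Int :=
  if _h : left < right then
    let mid := PySem.Int.floordiv (left + right + 1) 2
    if checkA words mid then searchesLoop words mid right
    else searchesLoop words left (mid - 1)
  else left
termination_by (right - left).toNat
decreasing_by
  · have := pvMidLt _h; omega
  · have := pvMidLt _h; omega

def searches (words : List String) : Int :=
  match PySem.List.pyGet? words 0 with
  | none => 0   -- words[0] raises IndexError on []; excluded by Pre_searches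
  | some w0 => searchesLoop words 0 (PySem.Str.len w0)

-- ===== PORT B =====
-- one pass of `for w in words: toggle w[:k1] in the set odd`
-- (`odd.remove(p)` under the guard `p in odd` is exactly Set.discard)
def toggleStep (k1 : Int) (odd : PySem.Set String) (w : String) : PySem.Set String :=
  let p := PySem.Str.slice w none (some k1)
  if PySem.Set.contains odd p then PySem.Set.discard odd p else PySem.Set.add odd p

def altLoop (words : List String) (total k : Int) : Int :=
  if _h : k < total then
    let odd := words.foldl (toggleStep (k + 1)) ([] : PySem.Set String)
    if odd.isEmpty then altLoop words total (k + 1) else k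
  else k
termination_by (total - k).toNat

def searches_alt (words : List String) : Int :=
  match PySem.List.pyGet? words 0 with
  | none => 0   -- words[0] raises IndexError on []; excluded by Pre_searches
  | some w0 => altLoop words (PySem.Str.len w0) 0

-- ===== PRECONDITION & SPEC =====
-- A evaluates words[0], which raises IndexError on the empty list; B does the same.
def Pre_searches (words : List String) : Prop := words ≠ []
instance (words : List String) : Decidable (Pre_searches words) := by unfold Pre_searches; infer_instance
def pvWitness_searches : List String := ["ab", "ab", "ax"]

def Spec_searches (words : List String) (out : Int) : Prop := out = searches_alt words
instance (words : List String) (out : Int) : Decidable (Spec_searches words out) := by unfold Spec_searches; infer_instance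

-- ===== CLAIM (what is proved, stated in full; the proofs are below) =====
def Claim_equal_searches : Prop := ∀ (words : List String), Dom_searches words → Pre_searches words → Spec_searches words (searches words)

-- ===== LEMMAS AND PROOFS =====

-- the common mathematical content: "every length-n prefix occurs an even number of times"
def ChkP (words : List String) (n : Nat) : Prop :=
  ∀ w ∈ words, Even (words.countP (fun v => v.toList.take n == w.toList.take n))

theorem countP_split {α : Type} (l : List α) (p r : α → Bool) :
    l.countP p = l.countP (fun v => p v && r v) + l.countP (fun v => p v && !r v) := by
  induction l with
  | nil => simp
  | cons a t ih =>
    simp only [List.countP_cons]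
    cases hp : p a <;> cases hr : r a <;> simp <;> omega

-- if every fiber of f occurs an even number of times in l, so does every fiber of q ∘ f
theorem even_countP_comp {α β : Type} [BEq β] [LawfulBEq β] (f : α → β) :
    ∀ (n : Nat) (l : List α), l.length = n →
      (∀ w ∈ l, Even (l.countP (fun v => f v == f w))) →
      ∀ q : β → Bool, Even (l.countP (fun v => q (f v))) := by
  intro n
  induction n using Nat.strong_induction_on with
  | _ n ih =>
    intro l hlen H q
    cases l with
    | nil => simp
    | cons a t =>
      have split := countP_split (a :: t) (fun v => q (f v)) (fun v => f v == f a)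
      have part2 : (a :: t).countP (fun v => q (f v) && !(f v == f a)) =
          ((a :: t).filter (fun v => !(f v == f a))).countP (fun v => q (f v)) := by
        rw [List.countP_filter]
      have part1 : Even ((a :: t).countP (fun v => q (f v) && (f v == f a))) := by
        by_cases hq : q (f a) = true
        · have : (a :: t).countP (fun v => q (f v) && (f v == f a)) =
              (a :: t).countP (fun v => f v == f a) := by
            apply List.countP_congr
            intro v _
            cases hv : (f v == f a)
            · simp
            · simp [eq_of_beq hv, hq]
          rw [this]; exact H a (by simp)
        · have : (a :: t).countP (fun v => q (f v) && (f v == f a)) = 0 := by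
            rw [List.countP_eq_zero]
            intro v _
            cases hv : (f v == f a)
            · simp
            · simp [eq_of_beq hv]; simpa using hq
          simp [this]
      set l' := (a :: t).filter (fun v => !(f v == f a)) with hl'
      have hlt : l'.length < n := by
        have : l' = t.filter (fun v => !(f v == f a)) := by
          simp [hl']
        rw [this]
        have := List.length_filter_le (fun v => !(f v == f a)) t
        simp at hlen; omega
      have H' : ∀ w ∈ l', Even (l'.countP (fun v => f v == f w)) := by
        intro w hw
        rw [List.mem_filter] at hw
        obtain ⟨hwl, hwne⟩ := hw
        have e1 : l'.countP (fun v => f v == f w) =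
            (a :: t).countP (fun v => (f v == f w) && !(f v == f a)) := by
          rw [hl', List.countP_filter]
        have e2 : (a :: t).countP (fun v => (f v == f w) && !(f v == f a)) =
            (a :: t).countP (fun v => f v == f w) := by
          apply List.countP_congr
          intro v _
          cases hv : (f v == f w)
          · simp
          · simp [eq_of_beq hv]; simpa using hwne
        rw [e1, e2]; exact H w hwl
      have := ih l'.length hlt l' rfl H' q
      rw [split, part2]
      exact part1.add this

theorem chkP_mono (words : List String) {m n : Nat} (hmn : m ≤ n) (h : ChkP words n) :
    ChkP words m := by
  intro w hw
  have key := even_countP_comp (fun v : String => v.toList.take n) words.length words rfl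
      (fun w' hw' => h w' hw') (fun b => b.take m == w.toList.take m)
  have : words.countP (fun v => (v.toList.take n).take m == w.toList.take m) =
      words.countP (fun v => v.toList.take m == w.toList.take m) := by
    apply List.countP_congr
    intro v _
    rw [List.take_take, Nat.min_eq_left hmn]
  rw [this] at key
  exact key

-- A's check equals ChkP
theorem beq_prefix (k : Int) (hk : 0 ≤ k) (v w : String) :
    (PySem.Str.slice v none (some k) == PySem.Str.slice w none (some k)) =
      (v.toList.take k.toNat == w.toList.take k.toNat) := by
  rw [Bool.eq_iff_iff]
  simp only [beq_iff_eq]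
  rw [← String.toList_inj]
  simp [PySem.Str.toList_slice, PySem.List.slice_to _ hk]

theorem checkA_iff (words : List String) (k : Int) (hk : 0 ≤ k) :
    checkA words k = true ↔ ChkP words k.toNat := by
  unfold checkA
  simp only []
  rw [PySem.Dict.values_eq_map_keys _ (PySem.Dict.nodup_keys_counter _) (0 : Int),
    PySem.Dict.keys_counter, List.all_map, List.all_eq_true]
  have hmem : ∀ p, p ∈ PySem.Set.ofList (words.map fun word => PySem.Str.slice word none (some k)) ↔
      p ∈ words.map fun word => PySem.Str.slice word none (some k) := fun p => PySem.Set.mem_ofList _ _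
  have hval : ∀ p, ((PySem.Int.mod ((PySem.Dict.counter (words.map fun word => PySem.Str.slice word none (some k))).getD p 0) 2 == 0) = true) ↔
      Even ((words.map fun word => PySem.Str.slice word none (some k)).count p) := by
    intro p
    rw [PySem.Dict.getD_counter]
    rw [beq_iff_eq]
    unfold PySem.Int.mod
    rw [show Int.fmod ((List.count p (words.map fun word => PySem.Str.slice word none (some k))):Int) 2 = ((List.count p (words.map fun word => PySem.Str.slice word none (some k))):Int) % 2 by rw [Int.fmod_eq_emod]; simp]
    rw [← Int.even_iff, Int.even_coe_nat]
  constructor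
  · intro h w hw
    have := h _ ((hmem _).mpr (List.mem_map_of_mem hw))
    rw [Function.comp_apply, hval] at this
    rw [List.count_eq_countP, List.countP_map] at this
    have e : (words.countP ((fun x => x == PySem.Str.slice w none (some k)) ∘ fun word => PySem.Str.slice word none (some k))) = words.countP (fun v => v.toList.take k.toNat == w.toList.take k.toNat) := by
      apply List.countP_congr
      intro v _
      rw [Function.comp_apply, beq_prefix k hk]
    rwa [e] at this
  · intro h p hp
    rw [Function.comp_apply, hval]
    rw [hmem] at hp
    obtain ⟨w, hw, rfl⟩ := List.mem_map.mp hp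
    have := h w hw
    rw [List.count_eq_countP, List.countP_map]
    have e : (words.countP ((fun x => x == PySem.Str.slice w none (some k)) ∘ fun word => PySem.Str.slice word none (some k))) = words.countP (fun v => v.toList.take k.toNat == w.toList.take k.toNat) := by
      apply List.countP_congr
      intro v _
      rw [Function.comp_apply, beq_prefix k hk]
    rwa [e]

-- B's parity set: membership after the fold is "odd count"
theorem toggleStep_eq (k1 : Int) (s : PySem.Set String) (w : String) :
    toggleStep k1 s w = if PySem.Set.contains s (PySem.Str.slice w none (some k1)) then
      PySem.Set.discard s (PySem.Str.slice w none (some k1)) else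
      PySem.Set.add s (PySem.Str.slice w none (some k1)) := rfl

theorem mem_foldl_toggle (k1 : Int) :
    ∀ (l : List String) (s : PySem.Set String), s.Nodup → ∀ x : String,
      (x ∈ l.foldl (toggleStep k1) s ↔
        Xor' (x ∈ s) (Odd (l.countP (fun w => PySem.Str.slice w none (some k1) == x)))) := by
  intro l
  induction l with
  | nil => intro s hs x; simp [Xor']
  | cons w t ih =>
    intro s hs x
    have hstep : (toggleStep k1 s w).Nodup := by
      rw [toggleStep_eq]; split
      · exact PySem.Set.nodup_discard _ _ hs
      · exact PySem.Set.nodup_add _ _ hs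
    rw [List.foldl_cons, ih _ hstep x, List.countP_cons, toggleStep_eq]
    by_cases hpx : PySem.Str.slice w none (some k1) = x
    · simp only [hpx, beq_self_eq_true, if_pos]
      by_cases hc : PySem.Set.contains s x = true
      · rw [if_pos hc]
        have hxs : x ∈ s := (PySem.Set.contains_iff _ _).mp hc
        have : x ∉ PySem.Set.discard s x := by
          rw [PySem.Set.mem_discard]; simp
        simp [Xor', this, hxs, Nat.odd_add_one]
      · rw [if_neg hc]
        have hxs : x ∉ s := fun h => hc ((PySem.Set.contains_iff _ _).mpr h)
        simp [Xor', hxs, Nat.odd_add_one]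
    · have hbx : (PySem.Str.slice w none (some k1) == x) = false := by
        simpa using hpx
      simp only [hbx, if_false, Bool.false_eq_true, add_zero]
      have hmem : (x ∈ (if PySem.Set.contains s (PySem.Str.slice w none (some k1)) then
          PySem.Set.discard s (PySem.Str.slice w none (some k1)) else
          PySem.Set.add s (PySem.Str.slice w none (some k1)))) ↔ x ∈ s := by
        split
        · rw [PySem.Set.mem_discard]
          constructor
          · exact fun h => h.1
          · exact fun h => ⟨h, fun he => hpx he.symm⟩
        · rw [PySem.Set.mem_add]
          constructor
          · rintro (h | h)
            · exact h
            · exact absurd h.symm hpx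
          · exact fun h => Or.inl h
      rw [hmem]

theorem checkB_iff (words : List String) (k : Int) (hk : 0 ≤ k) :
    (words.foldl (toggleStep (k + 1)) ([] : PySem.Set String)).isEmpty = true ↔
      ChkP words (k + 1).toNat := by
  rw [List.isEmpty_iff, List.eq_nil_iff_forall_not_mem]
  have hk1 : (0 : Int) ≤ k + 1 := by omega
  have hm : ∀ x, x ∈ words.foldl (toggleStep (k + 1)) ([] : PySem.Set String) ↔
      Odd (words.countP (fun w => PySem.Str.slice w none (some (k + 1)) == x)) := by
    intro x
    rw [mem_foldl_toggle (k + 1) words [] List.nodup_nil x]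
    simp [Xor']
  constructor
  · intro h w hw
    have := h (PySem.Str.slice w none (some (k + 1)))
    rw [hm, Nat.not_odd_iff_even] at this
    have e : words.countP (fun v => PySem.Str.slice v none (some (k + 1)) ==
        PySem.Str.slice w none (some (k + 1))) =
        words.countP (fun v => v.toList.take (k + 1).toNat == w.toList.take (k + 1).toNat) := by
      apply List.countP_congr
      intro v _
      rw [beq_prefix (k + 1) hk1]
    rwa [e] at this
  · intro h x
    rw [hm, Nat.not_odd_iff_even]
    by_cases hx : ∃ w ∈ words, PySem.Str.slice w none (some (k + 1)) = x
    · obtain ⟨w, hw, rfl⟩ := hx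
      have := h w hw
      have e : words.countP (fun v => PySem.Str.slice v none (some (k + 1)) ==
          PySem.Str.slice w none (some (k + 1))) =
          words.countP (fun v => v.toList.take (k + 1).toNat == w.toList.take (k + 1).toNat) := by
        apply List.countP_congr
        intro v _
        rw [beq_prefix (k + 1) hk1]
      rwa [e]
    · have : words.countP (fun w => PySem.Str.slice w none (some (k + 1)) == x) = 0 := by
        rw [List.countP_eq_zero]
        intro v hv
        simp only [beq_iff_eq]
        exact fun he => hx ⟨v, hv, he⟩
      simp [this]

-- the common characterisation of both loops' results
def PSpec (words : List String) (L r : Int) : Prop :=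
  0 ≤ r ∧ r ≤ L ∧ (∀ j : Int, 1 ≤ j → j ≤ r → ChkP words j.toNat) ∧
    (r = L ∨ ¬ ChkP words (r + 1).toNat)

theorem pspec_uniq {words : List String} {L r r' : Int}
    (h : PSpec words L r) (h' : PSpec words L r') : r = r' := by
  obtain ⟨hr0, hrL, hall, hlast⟩ := h
  obtain ⟨hr0', hrL', hall', hlast'⟩ := h'
  by_contra hne
  rcases lt_or_gt_of_ne hne with hlt | hlt
  · rcases hlast with hL | hnc
    · omega
    · exact hnc (hall' (r + 1) (by omega) (by omega))
  · rcases hlast' with hL | hnc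
    · omega
    · exact hnc (hall (r' + 1) (by omega) (by omega))

theorem searchesLoop_spec (words : List String) (L : Int)
    (mono : ∀ i j : Int, 1 ≤ i → i ≤ j → ChkP words j.toNat → ChkP words i.toNat) :
    ∀ (n : Nat) (l r : Int), (r - l).toNat = n → 0 ≤ l → l ≤ r → r ≤ L →
      (l = 0 ∨ ChkP words l.toNat) → (∀ j : Int, r < j → j ≤ L → ¬ ChkP words j.toNat) →
      PSpec words L (searchesLoop words l r) := by
  intro n
  induction n using Nat.strong_induction_on with
  | _ n ih =>
    intro l r hn h0 hlr hrL hleft hright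
    unfold searchesLoop
    by_cases h : l < r
    · rw [dif_pos h]
      have hmid := pvMidLt h
      show PSpec words L (if checkA words (PySem.Int.floordiv (l + r + 1) 2) then
        searchesLoop words (PySem.Int.floordiv (l + r + 1) 2) r
        else searchesLoop words l (PySem.Int.floordiv (l + r + 1) 2 - 1))
      by_cases hc : checkA words (PySem.Int.floordiv (l + r + 1) 2) = true
      · rw [if_pos hc]
        have hchk := (checkA_iff words _ (by omega)).mp hc
        exact ih (r - PySem.Int.floordiv (l + r + 1) 2).toNat (by omega) _ r rfl (by omega)
          (by omega) hrL (Or.inr hchk) hright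
      · rw [if_neg hc]
        apply ih (PySem.Int.floordiv (l + r + 1) 2 - 1 - l).toNat (by omega) l _ rfl h0
          (by omega) (by omega) hleft
        intro j hj hjL hchk
        by_cases hjr : r < j
        · exact hright j hjr hjL hchk
        · have hmj : ChkP words (PySem.Int.floordiv (l + r + 1) 2).toNat :=
            mono (PySem.Int.floordiv (l + r + 1) 2) j (by omega) (by omega) hchk
          exact hc ((checkA_iff words _ (by omega)).mpr hmj)
    · rw [dif_neg h]
      refine ⟨h0, by omega, ?_, ?_⟩
      · intro j hj1 hjl
        rcases hleft with h0' | hch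
        · omega
        · exact mono j l hj1 (by omega) hch
      · by_cases hL : l = L
        · exact Or.inl hL
        · exact Or.inr (hright (l + 1) (by omega) (by omega))

theorem altLoop_spec (words : List String) (L : Int) :
    ∀ (n : Nat) (k : Int), (L - k).toNat = n → 0 ≤ k → k ≤ L →
      (∀ j : Int, 1 ≤ j → j ≤ k → ChkP words j.toNat) →
      PSpec words L (altLoop words L k) := by
  intro n
  induction n using Nat.strong_induction_on with
  | _ n ih =>
    intro k hn h0 hkL hall
    unfold altLoop
    by_cases h : k < L
    · rw [dif_pos h]
      show PSpec words L (if (words.foldl (toggleStep (k + 1)) ([] : PySem.Set String)).isEmpty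
        then altLoop words L (k + 1) else k)
      by_cases he : (words.foldl (toggleStep (k + 1)) ([] : PySem.Set String)).isEmpty = true
      · rw [if_pos he]
        have hchk := (checkB_iff words k h0).mp he
        apply ih (L - (k + 1)).toNat (by omega) (k + 1) rfl (by omega) (by omega)
        intro j hj1 hjk
        by_cases hje : j = k + 1
        · rw [hje]; exact hchk
        · exact hall j hj1 (by omega)
      · rw [if_neg he]
        refine ⟨h0, le_of_lt h, hall, Or.inr ?_⟩
        intro hchk
        exact he ((checkB_iff words k h0).mpr hchk)
    · rw [dif_neg h]
      exact ⟨h0, hkL, hall, Or.inl (by omega)⟩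

-- ===== VERDICT (by name: the statement is the Claim_ definition above) =====
theorem searches_spec : Claim_equal_searches := by
  intro words _hdom hpre
  unfold Spec_searches
  cases words with
  | nil => exact absurd rfl hpre
  | cons w0 rest =>
    have hget : PySem.List.pyGet? (w0 :: rest) 0 = some w0 := by
      simp [PySem.List.pyGet?, PySem.List.pyIdx?]
    rw [searches, searches_alt, hget]
    set L : Int := PySem.Str.len w0 with hL
    have hL0 : 0 ≤ L := by rw [hL, PySem.Str.len]; positivity
    have mono : ∀ i j : Int, 1 ≤ i → i ≤ j → ChkP (w0 :: rest) j.toNat →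
        ChkP (w0 :: rest) i.toNat := by
      intro i j hi hij h
      exact chkP_mono _ (by omega) h
    have hA := searchesLoop_spec (w0 :: rest) L mono (L - 0).toNat 0 L rfl le_rfl hL0
        le_rfl (Or.inl rfl) (fun j h1 h2 => absurd h1 (by omega))
    have hB := altLoop_spec (w0 :: rest) L (L - 0).toNat 0 rfl le_rfl hL0
        (fun j h1 h2 => absurd h1 (by omega))
    exact pspec_uniq hA hB
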